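-- pv_equiv track=rewrite | github.com/Anders-Ekergard/Sestina1 | sestina.py | sestina
-- ===== SOURCE A (Python) =====
-- def sestina(slutord: list[str]) -> list[list[str]]:
--     if len(slutord) != 6:
--         raise ValueError("Please give six words")
--     rotation = [
--         [0, 1, 2, 3, 4, 5],
--         [5, 0, 4, 1, 3, 2],
--         [2, 5, 3, 0, 1, 4],
--         [4, 2, 1, 5, 0, 3],
--         [3, 4, 0, 2, 5, 1],
--         [1, 3, 5, 4, 2, 0]
--     ]
--     stanzas = []
--     for rot in rotation:
--         stanza = [slutord[i] for i in rot]
--         stanzas.append(stanza)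
--     return stanzas
-- ===== SOURCE B (Python) =====
-- def sestina(slutord: list[str]) -> list[list[str]]:
--     if len(slutord) != 6:
--         raise ValueError("Please give six words")
--     perm = [5, 0, 4, 1, 3, 2]
--     current = list(slutord)
--     stanzas = [current]
--     for _ in range(5):
--         current = [current[i] for i in perm]
--         stanzas.append(current)
--     return stanzas
-- ===== Notes on version B (the rewrite author's own statement) =====
-- stated objective: simpler
-- what changed: B drops the precomputed 6x6 rotation table and generates each stanza by iterating the single sestina permutation [5,0,4,1,3,2] on the previous stanza.
import Mathlib
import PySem

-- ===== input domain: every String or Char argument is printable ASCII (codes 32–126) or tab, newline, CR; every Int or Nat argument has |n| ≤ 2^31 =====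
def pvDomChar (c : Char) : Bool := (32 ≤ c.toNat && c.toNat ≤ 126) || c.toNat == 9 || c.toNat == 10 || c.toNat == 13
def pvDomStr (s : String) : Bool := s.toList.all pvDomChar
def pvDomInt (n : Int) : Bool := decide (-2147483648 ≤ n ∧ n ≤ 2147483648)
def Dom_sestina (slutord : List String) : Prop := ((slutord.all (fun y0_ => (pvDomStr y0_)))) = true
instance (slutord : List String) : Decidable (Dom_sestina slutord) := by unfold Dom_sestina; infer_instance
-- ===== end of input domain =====

-- B replaces A's precomputed 6x6 rotation table by iterating the sestina permutation [5,0,4,1,3,2] five times (objective: simpler).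

-- ===== PORT A =====
-- A raises ValueError when len(slutord) != 6; that input is outside Pre_sestina (the `[]` here is a placeholder).
def sestina (slutord : List String) : List (List String) :=
  if slutord.length ≠ 6 then []
  else
    let rotation : List (List Int) :=
      [[0, 1, 2, 3, 4, 5],
       [5, 0, 4, 1, 3, 2],
       [2, 5, 3, 0, 1, 4],
       [4, 2, 1, 5, 0, 3],
       [3, 4, 0, 2, 5, 1],
       [1, 3, 5, 4, 2, 0]]
    rotation.foldl
      (fun stanzas rot =>
        stanzas ++ [rot.map (fun i => (PySem.List.pyGet? slutord i).getD "")]) []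

-- ===== PORT B =====
-- B raises the same ValueError when len(slutord) != 6; outside Pre_sestina (the `[]` is a placeholder).
def sestina_alt (slutord : List String) : List (List String) :=
  if slutord.length ≠ 6 then []
  else
    let perm : List Int := [5, 0, 4, 1, 3, 2]
    let p := (List.range 5).foldl
      (fun (p : List (List String) × List String) _ =>
        let nxt := perm.map (fun i => (PySem.List.pyGet? p.2 i).getD "")
        (p.1 ++ [nxt], nxt))
      ([slutord], slutord)
    p.1

-- ===== PRECONDITION & SPEC =====
-- Pre_ excludes lists whose length is not 6, on which both A and B raise ValueError.
def Pre_sestina (slutord : List String) : Prop := slutord.length = 6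
instance (slutord : List String) : Decidable (Pre_sestina slutord) := by unfold Pre_sestina; infer_instance
def pvWitness_sestina : List String := ["a", "b", "c", "d", "e", "f"]
def Spec_sestina (slutord : List String) (out : List (List String)) : Prop := out = sestina_alt slutord
instance (slutord : List String) (out : List (List String)) : Decidable (Spec_sestina slutord out) := by unfold Spec_sestina; infer_instance

-- ===== CLAIM (what is proved, stated in full; the proofs are below) =====
def Claim_equal_sestina : Prop := ∀ (slutord : List String), Dom_sestina slutord → Pre_sestina slutord → Spec_sestina slutord (sestina slutord)

-- ===== LEMMAS AND PROOFS =====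

-- ===== VERDICT (by name: the statement is the Claim_ definition above) =====
theorem sestina_spec : Claim_equal_sestina := by
  intro slutord _ hpre
  unfold Spec_sestina
  match slutord, hpre with
  | [a, b, c, d, e, f], _ => rfl
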